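-- pv_equiv track=rewrite | github.com/rheedaanur/Belajar-Biopython | code/DNAtoolkit.py | make_protein
-- ===== SOURCE A (Python) =====
-- def make_protein(AcidList):
--     """
--     Buat protein daripada senarai asid amino yang diberi
--
--     """
--
--
-- #LANGKAH 1:Cari M (START)
-- #--> Append nilai M dan seterusnya
-- #LANGKAH 2: Cari _ (STOP)
-- #-->Jangan append_ dan berhenti
--
--     proteins = []
--     protein= []
--     for acid in AcidList:
--         if acid=="_":
--             #IF stop
--             if protein:
--                 for p in protein:
--                     #masukkan protein dalam senarai besar
--                     proteins.append(p)
--                 #kosongkan protein yang sekarang lepas dah masuk dalam senarai besar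
--
--                 protein= []
--         else:
--             if acid=="M":
--                 protein.append("") #Inilah bahagian yang mula ambik protein
--             for i in range(len(protein)):
--                 protein[i] += acid
--
--     return proteins
-- ===== SOURCE B (Python) =====
-- def make_protein(AcidList):
--     # Per stop-delimited segment: collect the acids once, join them into one
--     # string, and emit a slice of it from each "M" position -- instead of
--     # extending every active protein on every acid as A does.
--     proteins = []
--     seg = []
--     for acid in AcidList:
--         if acid == "_":
--             s = "".join(seg)
--             pos = 0
--             for x in seg:
--                 if x == "M":
--                     proteins.append(s[pos:])
--                 pos += len(x)
--             seg = []
--         else: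
--             seg.append(acid)
--     return proteins
-- ===== Notes on version B (the rewrite author's own statement) =====
-- stated objective: faster
-- what changed: Instead of appending each acid to every active protein on every step, B buffers the current segment, joins it into one string at each stop codon, and emits a slice from each 'M' position.
import Mathlib
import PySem

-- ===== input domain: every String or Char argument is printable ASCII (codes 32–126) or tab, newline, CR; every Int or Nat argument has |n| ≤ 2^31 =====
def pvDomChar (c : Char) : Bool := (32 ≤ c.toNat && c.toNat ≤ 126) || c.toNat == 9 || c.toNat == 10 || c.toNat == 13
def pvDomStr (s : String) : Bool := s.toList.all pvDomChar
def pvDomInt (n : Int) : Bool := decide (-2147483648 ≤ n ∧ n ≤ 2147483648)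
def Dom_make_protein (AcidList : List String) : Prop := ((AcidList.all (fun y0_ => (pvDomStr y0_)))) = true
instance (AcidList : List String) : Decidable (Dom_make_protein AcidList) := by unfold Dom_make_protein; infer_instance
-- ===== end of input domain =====

-- B per segment joins the acids once and slices from each "M" position, instead of A's
-- extending every active protein on every acid; equal return value proved on all inputs.

-- Python '+' on str, exact on code points (kernel-transparent, unlike String.append)
def strCat (a b : String) : String := String.ofList (a.toList ++ b.toList)

-- ===== PORT A =====
-- one iteration of A's loop over AcidList; state = (proteins, protein)
def stepA (st : List String × List String) (acid : String) : List String × List String :=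
  if acid = "_" then
    if st.2 ≠ [] then (st.1 ++ st.2, []) else st
  else
    let protein := if acid = "M" then st.2 ++ [""] else st.2
    (st.1, protein.map (fun p => strCat p acid))

def make_protein (AcidList : List String) : List String :=
  (AcidList.foldl stepA ([], [])).1

-- ===== PORT B =====
-- B's inner loop body: append s[pos:] at each "M", advance pos by len(x)
def innerB (s : String) (q : List String × Int) (x : String) : List String × Int :=
  (if x = "M" then q.1 ++ [PySem.Str.slice s (some q.2) none] else q.1,
   q.2 + PySem.Str.len x)

-- one iteration of B's loop; state = (proteins, seg)
def stepB (st : List String × List String) (acid : String) : List String × List String :=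
  if acid = "_" then
    let s := PySem.Str.join "" st.2
    ((st.2.foldl (innerB s) (st.1, 0)).1, [])
  else
    (st.1, st.2 ++ [acid])

def make_protein_alt (AcidList : List String) : List String :=
  (AcidList.foldl stepB ([], [])).1

-- ===== PRECONDITION & SPEC =====
def Spec_make_protein (AcidList : List String) (out : List String) : Prop := out = make_protein_alt AcidList
instance (AcidList : List String) (out : List String) : Decidable (Spec_make_protein AcidList out) := by unfold Spec_make_protein; infer_instance

-- ===== CLAIM (what is proved, stated in full; the proofs are below) =====
def Claim_equal_make_protein : Prop := ∀ (AcidList : List String), Dom_make_protein AcidList → Spec_make_protein AcidList (make_protein AcidList)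

-- ===== LEMMAS AND PROOFS =====

-- characters of a segment, concatenated
def charsOf (l : List String) : List Char := (l.map String.toList).flatten

-- the proteins a segment yields: one suffix string per "M" position
def tailsM : List String → List String
  | [] => []
  | a :: t => if a = "M" then String.ofList (charsOf (a :: t)) :: tailsM t else tailsM t

theorem charsOf_nil : charsOf [] = [] := rfl
theorem charsOf_cons (a : String) (t : List String) : charsOf (a :: t) = a.toList ++ charsOf t := by
  simp [charsOf]
theorem charsOf_append (l m : List String) : charsOf (l ++ m) = charsOf l ++ charsOf m := by
  simp [charsOf]

theorem chars_join (l : List String) : PySem.Chars.join [] (l.map String.toList) = charsOf l := by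
  induction l with
  | nil => simp [charsOf, PySem.Chars.join_nil]
  | cons a t ih =>
    cases t with
    | nil => simp only [List.map_cons, List.map_nil, PySem.Chars.join_singleton, charsOf, List.flatten]; simp
    | cons b u =>
      rw [List.map_cons, List.map_cons, PySem.Chars.join_cons_cons]
      rw [List.map_cons] at ih
      simp [charsOf_cons, ih]

theorem tailsM_snoc (seg : List String) (a : String) :
    tailsM (seg ++ [a]) =
      (if a = "M" then tailsM seg ++ [""] else tailsM seg).map (fun p => strCat p a) := by
  induction seg with
  | nil =>
    by_cases h : a = "M" <;>
      · apply List.ext_getElem <;>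
        · simp [tailsM, h, charsOf_cons, charsOf_nil]
          try (apply String.ext; simp [strCat])
  | cons x t ih =>
    by_cases hx : x = "M"
    · subst hx
      have hhead : String.ofList (charsOf ("M" :: (t ++ [a]))) = strCat (String.ofList (charsOf ("M" :: t))) a := by
        apply String.ext
        simp [strCat, charsOf_cons, charsOf_append, charsOf_nil]
      by_cases h : a = "M"
      · subst h
        simp [tailsM, ih, hhead]
      · simp [tailsM, h, ih, hhead]
    · simp only [List.cons_append, tailsM, if_neg hx, ih]

-- B's inner loop, generalized over the part of the segment already passed
theorem b_inner (seg2 : List String) : ∀ (seg1 ps : List String),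
    ((seg2.foldl (innerB (PySem.Str.join "" (seg1 ++ seg2))) (ps, ((charsOf seg1).length : Int))).1)
      = ps ++ tailsM seg2 := by
  induction seg2 with
  | nil => intro seg1 ps; simp [tailsM]
  | cons x rest ih =>
    intro seg1 ps
    have hlen : ((charsOf seg1).length : Int) + PySem.Str.len x = ((charsOf (seg1 ++ [x])).length : Int) := by
      simp [charsOf_append, charsOf_cons, charsOf_nil]
    have hassoc : seg1 ++ x :: rest = (seg1 ++ [x]) ++ rest := by simp
    by_cases hx : x = "M"
    · subst hx
      have hslice : PySem.Str.slice (PySem.Str.join "" (seg1 ++ "M" :: rest)) (some ((charsOf seg1).length : Int)) none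
          = String.ofList (charsOf ("M" :: rest)) := by
        apply String.ext
        have : (PySem.Str.join "" (seg1 ++ "M" :: rest)).toList = charsOf seg1 ++ charsOf ("M" :: rest) := by
          simp only [PySem.Str.toList_join]
          rw [show String.toList "" = [] from rfl, chars_join, charsOf_append]
        simp only [PySem.Str.toList_slice, PySem.Chars.slice_eq_listSlice, PySem.List.slice_from_natCast, this]
        simp
      rw [List.foldl_cons]
      show ((rest.foldl (innerB (PySem.Str.join "" (seg1 ++ "M" :: rest)))
        (innerB (PySem.Str.join "" (seg1 ++ "M" :: rest)) (ps, ((charsOf seg1).length : Int)) "M")).1) = _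
      rw [show innerB (PySem.Str.join "" (seg1 ++ "M" :: rest)) (ps, ((charsOf seg1).length : Int)) "M"
            = (ps ++ [String.ofList (charsOf ("M" :: rest))], ((charsOf (seg1 ++ ["M"])).length : Int)) by
          simp [innerB, hslice, charsOf_append, charsOf_cons, charsOf_nil]]
      rw [hassoc, ih (seg1 ++ ["M"]) (ps ++ [String.ofList (charsOf ("M" :: rest))])]
      simp [tailsM]
    · rw [List.foldl_cons]
      rw [show innerB (PySem.Str.join "" (seg1 ++ x :: rest)) (ps, ((charsOf seg1).length : Int)) x
            = (ps, ((charsOf (seg1 ++ [x])).length : Int)) by simp [innerB, hx, charsOf_append, charsOf_cons, charsOf_nil]]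
      rw [hassoc, ih (seg1 ++ [x]) ps]
      simp [tailsM, hx]

-- main invariant: A's running proteins are exactly the M-suffixes of B's pending segment
theorem main_inv (rest : List String) : ∀ (ps seg : List String),
    (rest.foldl stepA (ps, tailsM seg)).1 = (rest.foldl stepB (ps, seg)).1 := by
  induction rest with
  | nil => intro ps seg; rfl
  | cons a rest ih =>
    intro ps seg
    rw [List.foldl_cons, List.foldl_cons]
    by_cases ha : a = "_"
    · subst ha
      have hb : ((seg.foldl (innerB (PySem.Str.join "" seg)) (ps, 0)).1) = ps ++ tailsM seg := by
        have h0 := b_inner seg [] ps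
        simpa [charsOf_nil] using h0
      rw [show stepB (ps, seg) "_" = (ps ++ tailsM seg, []) by simp [stepB, hb]]
      by_cases h : tailsM seg = []
      · rw [show stepA (ps, tailsM seg) "_" = (ps, tailsM ([] : List String)) by
            simp [stepA, h, tailsM]]
        rw [show (ps ++ tailsM seg, ([] : List String)) = (ps, ([] : List String)) by simp [h]]
        exact ih ps []
      · rw [show stepA (ps, tailsM seg) "_" = (ps ++ tailsM seg, tailsM ([] : List String)) by
            simp [stepA, h, tailsM]]
        exact ih (ps ++ tailsM seg) []
    · rw [show stepA (ps, tailsM seg) a = (ps, tailsM (seg ++ [a])) by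
          simp [stepA, ha, tailsM_snoc]]
      rw [show stepB (ps, seg) a = (ps, seg ++ [a]) by simp [stepB, ha]]
      exact ih ps (seg ++ [a])

-- ===== VERDICT (by name: the statement is the Claim_ definition above) =====
theorem make_protein_spec : Claim_equal_make_protein := by
  intro l _
  show make_protein l = make_protein_alt l
  have := main_inv l [] []
  simpa [make_protein, make_protein_alt, tailsM] using this
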